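-- pv_equiv track=rewrite | github.com/profdocpizza/protFIX | utils.py | chunk_sequential_numbers
-- ===== SOURCE A (Python) =====
-- def chunk_sequential_numbers(numbers):
--     if not numbers:
--         return []
--     chunks = []
--     current_chunk = [numbers[0]]
--     for i in range(1, len(numbers)):
--         if numbers[i] == numbers[i - 1] + 1:
--             current_chunk.append(numbers[i])
--         else:
--             chunks.append(current_chunk)
--             current_chunk = [numbers[i]]
--     chunks.append(current_chunk)
--     return chunks
-- ===== SOURCE B (Python) =====
-- def chunk_sequential_numbers(numbers):
--     if not numbers:
--         return []
--     breaks = [i for i in range(1, len(numbers)) if numbers[i] != numbers[i - 1] + 1]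
--     bounds = [0] + breaks + [len(numbers)]
--     return [numbers[s:e] for s, e in zip(bounds, bounds[1:])]
-- ===== Notes on version B (the rewrite author's own statement) =====
-- stated objective: alternative
-- what changed: Replaces A's single-pass accumulator loop (growing a current chunk and flushing it at each break) by a two-phase strategy: first collect the break indices where consecutivity fails, then emit each chunk as a slice between consecutive boundaries.
import Mathlib
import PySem

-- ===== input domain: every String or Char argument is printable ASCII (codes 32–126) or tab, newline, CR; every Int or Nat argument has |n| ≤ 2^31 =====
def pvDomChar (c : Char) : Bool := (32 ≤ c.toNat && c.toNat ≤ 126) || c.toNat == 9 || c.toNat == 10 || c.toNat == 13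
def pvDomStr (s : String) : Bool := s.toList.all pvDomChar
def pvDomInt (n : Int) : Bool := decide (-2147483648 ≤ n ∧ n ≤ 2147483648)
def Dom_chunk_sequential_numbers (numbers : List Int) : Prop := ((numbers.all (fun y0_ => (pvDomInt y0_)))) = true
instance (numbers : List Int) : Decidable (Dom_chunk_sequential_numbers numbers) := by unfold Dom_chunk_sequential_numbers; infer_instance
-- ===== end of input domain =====

-- B groups by break indices + slicing instead of A's accumulator loop; alternative algorithm, same cost.

-- ===== PORT A =====
def chunk_sequential_numbers (numbers : List Int) : List (List Int) :=
  if numbers.isEmpty then []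
  else
    let s := (PySem.List.pyRange 1 (PySem.List.len numbers) 1).foldl
      (fun (s : List (List Int) × List Int) i =>
        if PySem.List.pyGetD numbers i 0 = PySem.List.pyGetD numbers (i - 1) 0 + 1 then
          (s.1, s.2 ++ [PySem.List.pyGetD numbers i 0])
        else
          (s.1 ++ [s.2], [PySem.List.pyGetD numbers i 0]))
      ([], [PySem.List.pyGetD numbers 0 0])
    s.1 ++ [s.2]

-- ===== PORT B =====
def chunk_sequential_numbers_alt (numbers : List Int) : List (List Int) :=
  if numbers.isEmpty then []
  else
    let breaks := (PySem.List.pyRange 1 (PySem.List.len numbers) 1).filter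
      (fun i => decide (PySem.List.pyGetD numbers i 0 ≠ PySem.List.pyGetD numbers (i - 1) 0 + 1))
    let bounds := [(0 : Int)] ++ breaks ++ [PySem.List.len numbers]
    (bounds.zip (bounds.drop 1)).map (fun p => PySem.List.slice numbers (some p.1) (some p.2))

-- ===== PRECONDITION & SPEC =====
def Spec_chunk_sequential_numbers (numbers : List Int) (out : List (List Int)) : Prop := out = chunk_sequential_numbers_alt numbers
instance (numbers : List Int) (out : List (List Int)) : Decidable (Spec_chunk_sequential_numbers numbers out) := by unfold Spec_chunk_sequential_numbers; infer_instance

-- ===== CLAIM (what is proved, stated in full; the proofs are below) =====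
def Claim_equal_chunk_sequential_numbers : Prop := ∀ (numbers : List Int), Dom_chunk_sequential_numbers numbers → Spec_chunk_sequential_numbers numbers (chunk_sequential_numbers numbers)

-- ===== LEMMAS AND PROOFS =====

-- reference chunking, structural on the list
def chunksOf : List Int → List (List Int)
  | [] => []
  | x :: rest =>
    match chunksOf rest, rest with
    | g :: gs, w :: _ => if w = x + 1 then (x :: g) :: gs else [x] :: g :: gs
    | _, _ => [[x]]

def mergeFirst (cur : List Int) : List (List Int) → List (List Int)
  | [] => [cur]
  | g :: gs => (cur ++ g) :: gs

lemma chunksOf_ne_nil (x : Int) (rest : List Int) : chunksOf (x :: rest) ≠ [] := by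
  unfold chunksOf
  split
  · split <;> simp
  · simp

lemma chunksOf_cons (x : Int) (rest : List Int) :
    chunksOf (x :: rest) =
      match rest with
      | [] => [[x]]
      | y :: _ => if y = x + 1 then mergeFirst [x] (chunksOf rest) else [x] :: chunksOf rest := by
  cases rest with
  | nil => simp [chunksOf]
  | cons y t =>
    cases h : chunksOf (y :: t) with
    | nil => exact absurd h (chunksOf_ne_nil y t)
    | cons g gs =>
      show (match chunksOf (y :: t), y :: t with
            | g :: gs, w :: _ => if w = x + 1 then (x :: g) :: gs else [x] :: g :: gs
            | _, _ => [[x]])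
          = if y = x + 1 then mergeFirst [x] (g :: gs) else [x] :: g :: gs
      rw [h]
      by_cases hy : y = x + 1 <;> simp [hy, mergeFirst]

-- A-side loop body reformulated on the value list
def goA : Int → List Int → List (List Int) → List Int → List (List Int) × List Int
  | _, cur, acc, [] => (acc, cur)
  | prev, cur, acc, x :: rest =>
    if x = prev + 1 then goA x (cur ++ [x]) acc rest else goA x [x] (acc ++ [cur]) rest

lemma goA_spec (xs : List Int) : ∀ (prev : Int) (cur : List Int) (acc : List (List Int)),
    (goA prev cur acc xs).1 ++ [(goA prev cur acc xs).2]
      = acc ++ (match xs with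
          | [] => [cur]
          | x :: _ => if x = prev + 1 then mergeFirst cur (chunksOf xs) else cur :: chunksOf xs) := by
  induction xs with
  | nil => intro prev cur acc; simp [goA]
  | cons x rest ih =>
    intro prev cur acc
    by_cases hx : x = prev + 1
    · simp only [goA, if_pos hx, ih]
      rw [chunksOf_cons]
      cases rest with
      | nil => simp [mergeFirst]
      | cons y t =>
        cases h : chunksOf (y :: t) with
        | nil => exact absurd h (chunksOf_ne_nil y t)
        | cons g gs =>
          by_cases hy : y = x + 1 <;> simp [hy, mergeFirst]
    · simp only [goA, if_neg hx, ih]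
      rw [chunksOf_cons]
      cases rest with
      | nil => simp
      | cons y t =>
        by_cases hy : y = x + 1 <;> simp [hy, mergeFirst]

lemma pyGetD_cast (numbers : List Int) (k : Nat) (hk : k < numbers.length) :
    PySem.List.pyGetD numbers (k : Int) 0 = numbers[k] := by
  rw [PySem.List.pyGetD_natCast, List.getD_eq_getElem numbers 0 hk]

lemma pyGetD_cast_pred (numbers : List Int) (k : Nat) (h1 : 1 ≤ k) (hk : k - 1 < numbers.length) :
    PySem.List.pyGetD numbers ((k : Int) - 1) 0 = numbers[k - 1] := by
  have : ((k : Int) - 1) = ((k - 1 : Nat) : Int) := by omega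
  rw [this, PySem.List.pyGetD_natCast, List.getD_eq_getElem numbers 0 hk]

lemma Ago (numbers : List Int) : ∀ (m k : Nat), numbers.length - k = m → 1 ≤ k → k ≤ numbers.length →
    ∀ (acc : List (List Int)) (cur : List Int),
    (PySem.List.pyRange (k : Int) (numbers.length : Int) 1).foldl
      (fun (s : List (List Int) × List Int) i =>
        if PySem.List.pyGetD numbers i 0 = PySem.List.pyGetD numbers (i - 1) 0 + 1 then
          (s.1, s.2 ++ [PySem.List.pyGetD numbers i 0])
        else
          (s.1 ++ [s.2], [PySem.List.pyGetD numbers i 0])) (acc, cur)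
      = goA (PySem.List.pyGetD numbers ((k : Int) - 1) 0) cur acc (numbers.drop k) := by
  intro m
  induction m with
  | zero =>
    intro k hm h1 h2 acc cur
    have hk : k = numbers.length := by omega
    rw [PySem.List.pyRange_one_eq_nil (by omega)]
    simp [goA, hk, List.drop_of_length_le]
  | succ m ih =>
    intro k hm h1 h2 acc cur
    have hk : k < numbers.length := by omega
    rw [PySem.List.pyRange_one_cons (by exact_mod_cast hk)]
    have hdrop : numbers.drop k = numbers[k] :: numbers.drop (k + 1) :=
      List.drop_eq_getElem_cons hk
    have hget : PySem.List.pyGetD numbers (k : Int) 0 = numbers[k] := pyGetD_cast numbers k hk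
    have hcast : ((k : Int) + 1) = ((k + 1 : Nat) : Int) := by push_cast; ring
    have hprev : ((k + 1 : Nat) : Int) - 1 = (k : Int) := by push_cast; ring
    simp only [List.foldl_cons]
    by_cases hx : numbers[k] = PySem.List.pyGetD numbers ((k : Int) - 1) 0 + 1
    · rw [if_pos (by rw [hget]; exact hx)]
      rw [hcast, ih (k + 1) (by omega) (by omega) (by omega)]
      rw [hdrop, hprev, hget]
      simp [goA, hx]
    · rw [if_neg (by rw [hget]; exact hx)]
      rw [hcast, ih (k + 1) (by omega) (by omega) (by omega)]
      rw [hdrop, hprev, hget]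
      simp [goA, hx]

lemma A_eq_chunksOf (numbers : List Int) : chunk_sequential_numbers numbers = chunksOf numbers := by
  cases numbers with
  | nil => simp [chunk_sequential_numbers, chunksOf]
  | cons x rest =>
    unfold chunk_sequential_numbers
    simp only [List.isEmpty_cons, if_neg (by simp : ¬ (false = true))]
    rw [show PySem.List.len (x :: rest) = ((x :: rest).length : Int) from PySem.List.len_eq _]
    have hA := Ago (x :: rest) ((x :: rest).length - 1) 1 rfl (by omega) (by simp)
      [] [PySem.List.pyGetD (x :: rest) 0 0]
    simp only [Nat.cast_one] at hA
    rw [hA]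
    have h0 : PySem.List.pyGetD (x :: rest) ((1 : Int) - 1) 0 = x := by norm_num [PySem.List.pyGetD_zero_cons]
    have h0' : PySem.List.pyGetD (x :: rest) 0 0 = x := PySem.List.pyGetD_zero_cons x rest 0
    rw [h0, h0']
    simp only [List.drop_one, List.tail_cons]
    rw [goA_spec rest x [x] [], chunksOf_cons]
    cases rest with
    | nil => simp
    | cons y t => by_cases hy : y = x + 1 <;> simp [hy, mergeFirst]

-- B side: peel one element off the front of a slice
lemma slice_peel (xs : List Int) (m bn : Nat) (h1 : m < bn) (h2 : m < xs.length) :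
    PySem.List.slice xs (some (m : Int)) (some (bn : Int))
      = xs[m] :: PySem.List.slice xs (some ((m : Int) + 1)) (some (bn : Int)) := by
  have hcast : ((m : Int) + 1) = ((m + 1 : Nat) : Int) := by push_cast; ring
  rw [hcast, PySem.List.slice_natCast, PySem.List.slice_natCast]
  rw [List.drop_eq_getElem_cons h2]
  have : bn - m = (bn - (m + 1)) + 1 := by omega
  rw [this, List.take_succ_cons]

lemma slice_empty (xs : List Int) (a : Nat) :
    PySem.List.slice xs (some (a : Int)) (some (a : Int)) = [] := by
  rw [PySem.List.slice_natCast]; simp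

lemma Bgo (numbers : List Int) : ∀ (m k : Nat), numbers.length - k = m → 1 ≤ k → k ≤ numbers.length →
    ((((k - 1 : Nat) : Int) :: (((PySem.List.pyRange (k : Int) (numbers.length : Int) 1).filter
        (fun i => decide (PySem.List.pyGetD numbers i 0 ≠ PySem.List.pyGetD numbers (i - 1) 0 + 1)))
        ++ [(numbers.length : Int)])).zip
      (((PySem.List.pyRange (k : Int) (numbers.length : Int) 1).filter
        (fun i => decide (PySem.List.pyGetD numbers i 0 ≠ PySem.List.pyGetD numbers (i - 1) 0 + 1)))
        ++ [(numbers.length : Int)])).map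
      (fun p => PySem.List.slice numbers (some p.1) (some p.2))
    = chunksOf (numbers.drop (k - 1)) := by
  intro m
  induction m with
  | zero =>
    intro k hm h1 h2
    have hk : k = numbers.length := by omega
    rw [PySem.List.pyRange_one_eq_nil (by omega)]
    have hlt : k - 1 < numbers.length := by omega
    have hdrop : numbers.drop (k - 1) = [numbers[k - 1]] := by
      rw [List.drop_eq_getElem_cons hlt]
      simp [List.drop_of_length_le, show numbers.length ≤ k - 1 + 1 by omega]
    rw [hdrop]
    simp only [List.filter_nil, List.nil_append, List.zip_cons_cons, List.zip_nil_right,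
      List.map_cons, List.map_nil]
    rw [show (numbers.length : Int) = ((k - 1 + 1 : Nat) : Int) by omega]
    rw [slice_peel numbers (k - 1) (k - 1 + 1) (by omega) hlt]
    rw [show ((k - 1 : Nat) : Int) + 1 = ((k - 1 + 1 : Nat) : Int) by push_cast; ring]
    rw [slice_empty]
    simp [chunksOf]
  | succ m ih =>
    intro k hm h1 h2
    have hk : k < numbers.length := by omega
    have hk1 : k - 1 < numbers.length := by omega
    rw [PySem.List.pyRange_one_cons (by exact_mod_cast hk)]
    have hcast : ((k : Int) + 1) = ((k + 1 : Nat) : Int) := by push_cast; ring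
    have hdrop : numbers.drop (k - 1) = numbers[k - 1] :: numbers.drop k :=
      by rw [List.drop_eq_getElem_cons hk1, show k - 1 + 1 = k by omega]
    have hdropk : numbers.drop k = numbers[k] :: numbers.drop (k + 1) :=
      List.drop_eq_getElem_cons hk
    have hget : PySem.List.pyGetD numbers (k : Int) 0 = numbers[k] := pyGetD_cast numbers k hk
    have hgetp : PySem.List.pyGetD numbers ((k : Int) - 1) 0 = numbers[k - 1] :=
      pyGetD_cast_pred numbers k h1 hk1
    have ihk := ih (k + 1) (by omega) (by omega) (by omega)
    rw [show ((k + 1 - 1 : Nat) : Int) = (k : Int) by push_cast; omega] at ihk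
    rw [show (k + 1 - 1 : Nat) = k by omega] at ihk
    by_cases hx : numbers[k] = numbers[k - 1] + 1
    · -- no break at k: the filter drops k, first chunk absorbs numbers[k-1]
      rw [List.filter_cons_of_neg (by simp [hget, hgetp, hx])]
      rw [hcast]
      -- the breaks++[n] list is nonempty: name its head/tail
      cases hL : ((PySem.List.pyRange ((k + 1 : Nat) : Int) (numbers.length : Int) 1).filter
          (fun i => decide (PySem.List.pyGetD numbers i 0 ≠ PySem.List.pyGetD numbers (i - 1) 0 + 1)))
          ++ [(numbers.length : Int)] with
      | nil => exact absurd hL (by simp)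
      | cons b L' =>
        rw [hL] at ihk
        simp only [List.zip_cons_cons, List.map_cons] at ihk ⊢
        -- b is a valid bound: k < b ≤ length
        have hb : (k : Int) < b ∧ b ≤ (numbers.length : Int) := by
          have : b ∈ ((PySem.List.pyRange ((k + 1 : Nat) : Int) (numbers.length : Int) 1).filter
              (fun i => decide (PySem.List.pyGetD numbers i 0 ≠ PySem.List.pyGetD numbers (i - 1) 0 + 1)))
              ++ [(numbers.length : Int)] := by rw [hL]; exact List.mem_cons_self
          rcases List.mem_append.mp this with hb | hb
          · have := PySem.List.mem_pyRange_one.mp (List.mem_of_mem_filter hb)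
            constructor <;> [exact_mod_cast (by omega : ((k : Int) + 1) ≤ b); omega]
          · simp at hb; omega
        have hbn : b = ((b.toNat : Nat) : Int) := by omega
        have hpeel : PySem.List.slice numbers (some ((k - 1 : Nat) : Int)) (some b)
            = numbers[k - 1] :: PySem.List.slice numbers (some ((k : Nat) : Int)) (some b) := by
          rw [hbn, slice_peel numbers (k - 1) b.toNat (by omega) hk1]
          rw [show ((k - 1 : Nat) : Int) + 1 = ((k : Nat) : Int) by omega]
        rw [hpeel, hdrop, chunksOf_cons, ← ihk, hdropk]
        simp [hx, mergeFirst]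
    · -- break at k: the filter keeps k, chunk [numbers[k-1]] is emitted
      rw [List.filter_cons_of_pos (by simp [hget, hgetp, hx])]
      rw [hcast]
      simp only [List.cons_append, List.zip_cons_cons, List.map_cons]
      have hpeel : PySem.List.slice numbers (some ((k - 1 : Nat) : Int)) (some ((k : Nat) : Int))
          = [numbers[k - 1]] := by
        rw [slice_peel numbers (k - 1) k (by omega) hk1]
        rw [show ((k - 1 : Nat) : Int) + 1 = ((k : Nat) : Int) by omega, slice_empty]
      rw [hpeel, hdrop, chunksOf_cons, ← ihk, hdropk]
      simp [hx]

lemma B_eq_chunksOf (numbers : List Int) : chunk_sequential_numbers_alt numbers = chunksOf numbers := by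
  cases hn : numbers with
  | nil => simp [chunk_sequential_numbers_alt, chunksOf]
  | cons x rest =>
    unfold chunk_sequential_numbers_alt
    simp only [List.isEmpty_cons, if_neg (by simp : ¬ (false = true))]
    rw [show PySem.List.len (x :: rest) = (((x :: rest).length : Nat) : Int) from PySem.List.len_eq _]
    have := Bgo (x :: rest) ((x :: rest).length - 1) 1 rfl (by omega) (by simp)
    simp only [List.singleton_append] at this ⊢
    rw [show ((1 - 1 : Nat) : Int) = (0 : Int) by norm_num] at this
    rw [show ((1 : Nat) : Int) = (1 : Int) by norm_num] at this
    rw [show (1 - 1 : Nat) = 0 by norm_num, List.drop_zero] at this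
    exact this

-- ===== VERDICT (by name: the statement is the Claim_ definition above) =====
theorem chunk_sequential_numbers_spec : Claim_equal_chunk_sequential_numbers := by
  intro numbers _
  unfold Spec_chunk_sequential_numbers
  rw [A_eq_chunksOf, B_eq_chunksOf]
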